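-- pv_equiv track=rewrite | github.com/kagebarton/whisper2srt | pipeline/stages/loudnorm_analyze.py | _extract_json_from_stderr
-- ===== SOURCE A (Python) =====
-- def _extract_json_from_stderr(stderr: str) -> str | None:
--     """Walk backward through stderr lines to find the JSON block.
--
--     Loudnorm writes the stats JSON to stderr. We iterate from the last
--     line toward the first, finding the closing '}' then collecting
--     backward until the opening '{'.
--     """
--     lines = stderr.strip().split("\n")
--     end_idx = None
--     for i in range(len(lines) - 1, -1, -1):
--         if lines[i].strip().endswith("}"):
--             end_idx = i
--             break
--
--     if end_idx is None:
--         return None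
--
--     # Walk backward from the closing '}' to find the opening '{'
--     start_idx = None
--     for i in range(end_idx, -1, -1):
--         if lines[i].strip().startswith("{"):
--             start_idx = i
--             break
--
--     if start_idx is None:
--         return None
--
--     return "\n".join(lines[start_idx:end_idx + 1])
-- ===== SOURCE B (Python) =====
-- def _extract_json_from_stderr(stderr: str) -> str | None:
--     """Single forward pass: track the most recent '{' line and update the
--     candidate block whenever a line ending in '}' is seen."""
--     lines = stderr.strip().split("\n")
--     last_open = None
--     start_idx = None
--     end_idx = None
--     for i, line in enumerate(lines):
--         s = line.strip()
--         if s.startswith("{"):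
--             last_open = i
--         if s.endswith("}"):
--             start_idx = last_open
--             end_idx = i
--     if end_idx is None or start_idx is None:
--         return None
--     return "\n".join(lines[start_idx:end_idx + 1])
-- ===== Notes on version B (the rewrite author's own statement) =====
-- stated objective: alternative
-- what changed: Replaced A's two backward scans (find last closing-brace line, then scan backward again for the opening-brace line) with a single forward pass that maintains the index of the most recent '{' line and updates the candidate (start,end) pair at every '}' line.
import Mathlib
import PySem

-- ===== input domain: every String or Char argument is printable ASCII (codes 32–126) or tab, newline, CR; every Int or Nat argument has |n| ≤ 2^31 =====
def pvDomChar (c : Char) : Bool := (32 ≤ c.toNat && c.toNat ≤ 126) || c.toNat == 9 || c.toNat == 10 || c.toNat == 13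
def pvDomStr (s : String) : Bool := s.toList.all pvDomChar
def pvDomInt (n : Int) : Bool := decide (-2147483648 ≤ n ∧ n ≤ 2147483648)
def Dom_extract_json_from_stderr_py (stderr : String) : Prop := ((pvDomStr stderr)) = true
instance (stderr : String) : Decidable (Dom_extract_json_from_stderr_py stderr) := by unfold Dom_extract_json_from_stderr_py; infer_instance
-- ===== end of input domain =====

-- B replaces A's two backward scans with one forward pass keeping the last '{' line index (alternative decomposition, same cost).

-- ===== PORT A =====
-- line i of `lines`, stripped, ends with "}" (A's first loop test)
def pvIsCloseA (lines : List String) (i : Nat) : Bool :=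
  PySem.Str.endswith (PySem.Str.strip (lines.getD i "")) "}"

-- line i of `lines`, stripped, starts with "{" (A's second loop test)
def pvIsOpenA (lines : List String) (i : Nat) : Bool :=
  PySem.Str.startswith (PySem.Str.strip (lines.getD i "")) "{"

-- A's first loop: for i in range(len-1, -1, -1): break at first close
def pvFindClose (lines : List String) : Nat → Option Nat
  | 0 => if pvIsCloseA lines 0 then some 0 else none
  | i + 1 => if pvIsCloseA lines (i + 1) then some (i + 1) else pvFindClose lines i

-- A's second loop: for i in range(end_idx, -1, -1): break at first open
def pvFindOpen (lines : List String) : Nat → Option Nat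
  | 0 => if pvIsOpenA lines 0 then some 0 else none
  | i + 1 => if pvIsOpenA lines (i + 1) then some (i + 1) else pvFindOpen lines i

def extract_json_from_stderr_py (stderr : String) : Option String :=
  let lines := (PySem.Str.split? (PySem.Str.strip stderr) "\n").getD []
  match pvFindClose lines (lines.length - 1) with
  | none => none
  | some endIdx =>
    match pvFindOpen lines endIdx with
    | none => none
    | some startIdx =>
      some (PySem.Str.join "\n"
        (PySem.List.slice lines (some (startIdx : Int)) (some ((endIdx : Int) + 1))))

-- ===== PORT B =====
-- B's forward loop: state = (last_open, start_idx, end_idx); i is the enumerate counter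
def pvScan : List String → Nat → Option Nat × Option Nat × Option Nat →
    Option Nat × Option Nat × Option Nat
  | [], _, st => st
  | line :: rest, i, (lastOpen, startIdx, endIdx) =>
    let s := PySem.Str.strip line
    let lastOpen' := if PySem.Str.startswith s "{" then some i else lastOpen
    if PySem.Str.endswith s "}" then
      pvScan rest (i + 1) (lastOpen', lastOpen', some i)
    else
      pvScan rest (i + 1) (lastOpen', startIdx, endIdx)

def extract_json_from_stderr_py_alt (stderr : String) : Option String :=
  let lines := (PySem.Str.split? (PySem.Str.strip stderr) "\n").getD []
  match pvScan lines 0 (none, none, none) with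
  | (_, some startIdx, some endIdx) =>
    some (PySem.Str.join "\n"
      (PySem.List.slice lines (some (startIdx : Int)) (some ((endIdx : Int) + 1))))
  | _ => none

-- ===== PRECONDITION & SPEC =====
def Spec_extract_json_from_stderr_py (stderr : String) (out : Option String) : Prop := out = extract_json_from_stderr_py_alt stderr
instance (stderr : String) (out : Option String) : Decidable (Spec_extract_json_from_stderr_py stderr out) := by unfold Spec_extract_json_from_stderr_py; infer_instance

-- ===== CLAIM (what is proved, stated in full; the proofs are below) =====
def Claim_equal_extract_json_from_stderr_py : Prop := ∀ (stderr : String), Dom_extract_json_from_stderr_py stderr → Spec_extract_json_from_stderr_py stderr (extract_json_from_stderr_py stderr)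

-- ===== LEMMAS AND PROOFS =====

theorem pvIsCloseA_empty (i : Nat) : pvIsCloseA [] i = false := by
  simp only [pvIsCloseA, List.getD_nil]; decide

theorem pvIsOpenA_empty (i : Nat) : pvIsOpenA [] i = false := by
  simp only [pvIsOpenA, List.getD_nil]; decide

-- appending a line does not change the tests at indices inside the prefix
theorem pvIsCloseA_append (l : List String) (x : String) (i : Nat) (h : i < l.length) :
    pvIsCloseA (l ++ [x]) i = pvIsCloseA l i := by
  simp [pvIsCloseA, List.getD, List.getElem?_append_left h]

theorem pvIsOpenA_append (l : List String) (x : String) (i : Nat) (h : i < l.length) :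
    pvIsOpenA (l ++ [x]) i = pvIsOpenA l i := by
  simp [pvIsOpenA, List.getD, List.getElem?_append_left h]

theorem pvFindClose_append (l : List String) (x : String) (i : Nat) (h : i < l.length) :
    pvFindClose (l ++ [x]) i = pvFindClose l i := by
  induction i with
  | zero => simp [pvFindClose, pvIsCloseA_append l x 0 h]
  | succ k ih =>
    simp only [pvFindClose, pvIsCloseA_append l x (k + 1) h]
    rw [ih (by omega)]

theorem pvFindOpen_append (l : List String) (x : String) (i : Nat) (h : i < l.length) :
    pvFindOpen (l ++ [x]) i = pvFindOpen l i := by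
  induction i with
  | zero => simp [pvFindOpen, pvIsOpenA_append l x 0 h]
  | succ k ih =>
    simp only [pvFindOpen, pvIsOpenA_append l x (k + 1) h]
    rw [ih (by omega)]

theorem pvFindClose_le (lines : List String) (i j : Nat)
    (h : pvFindClose lines i = some j) : j ≤ i := by
  induction i with
  | zero =>
    simp only [pvFindClose] at h
    split at h <;> simp_all
  | succ k ih =>
    simp only [pvFindClose] at h
    split at h
    · simp_all
    · exact Nat.le_succ_of_le (ih h)

theorem pvFindClose_empty (i : Nat) : pvFindClose [] i = none := by
  induction i with
  | zero => decide
  | succ k ih => simp [pvFindClose, pvIsCloseA_empty, ih]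

theorem pvFindOpen_empty (i : Nat) : pvFindOpen [] i = none := by
  induction i with
  | zero => decide
  | succ k ih => simp [pvFindOpen, pvIsOpenA_empty, ih]

set_option maxHeartbeats 1000000 in
theorem pvScan_append (l : List String) (x : String) (i : Nat)
    (st : Option Nat × Option Nat × Option Nat) :
    pvScan (l ++ [x]) i st = pvScan [x] (i + l.length) (pvScan l i st) := by
  induction l generalizing i st with
  | nil => rfl
  | cons y ys ih =>
    obtain ⟨lo, si, ei⟩ := st
    have hn : i + (y :: ys).length = (i + 1) + ys.length := by
      simp only [List.length_cons]; omega
    rw [hn]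
    show pvScan (y :: (ys ++ [x])) i (lo, si, ei) = _
    simp only [pvScan]
    split <;> (rw [ih]; simp only [pvScan])

/-- the forward scan computes exactly A's two backward searches -/
theorem pvScan_spec (lines : List String) :
    pvScan lines 0 (none, none, none) =
      (pvFindOpen lines (lines.length - 1),
       (match pvFindClose lines (lines.length - 1) with
        | none => none
        | some j => pvFindOpen lines j),
       pvFindClose lines (lines.length - 1)) := by
  induction lines using List.reverseRecOn with
  | nil =>
    show (none, none, none) = _
    rw [pvFindOpen_empty, pvFindClose_empty]
  | append_singleton l x ih =>
    rw [pvScan_append, ih]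
    have hx : (l ++ [x]).getD l.length "" = x := by
      simp [List.getD]
    have hlen : (l ++ [x]).length - 1 = l.length := by simp
    have hopen : pvFindOpen (l ++ [x]) l.length
        = if PySem.Str.startswith (PySem.Str.strip x) "{" then some l.length
          else pvFindOpen l (l.length - 1) := by
      cases hl : l.length with
      | zero =>
        have hnil : l = [] := List.length_eq_zero_iff.mp hl
        subst hnil
        show pvFindOpen [x] 0 = if PySem.Str.startswith (PySem.Str.strip x) "{" = true
          then some 0 else pvFindOpen [] 0
        rw [pvFindOpen_empty]
        simp [pvFindOpen, pvIsOpenA]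
      | succ k =>
        rw [hl] at hx
        simp only [pvFindOpen, pvIsOpenA, hx]
        rw [pvFindOpen_append l x k (by omega)]
        simp
    have hclose : pvFindClose (l ++ [x]) l.length
        = if PySem.Str.endswith (PySem.Str.strip x) "}" then some l.length
          else pvFindClose l (l.length - 1) := by
      cases hl : l.length with
      | zero =>
        have hnil : l = [] := List.length_eq_zero_iff.mp hl
        subst hnil
        show pvFindClose [x] 0 = if PySem.Str.endswith (PySem.Str.strip x) "}" = true
          then some 0 else pvFindClose [] 0
        rw [pvFindClose_empty]
        simp [pvFindClose, pvIsCloseA]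
      | succ k =>
        rw [hl] at hx
        simp only [pvFindClose, pvIsCloseA, hx]
        rw [pvFindClose_append l x k (by omega)]
        simp
    rw [hlen, hclose]
    by_cases hcl : PySem.Str.endswith (PySem.Str.strip x) "}"
    · simp only [pvScan, hcl, if_true, Nat.zero_add, hopen]
    · simp only [pvScan, hcl, Nat.zero_add, hopen]
      refine Prod.ext rfl (Prod.ext ?_ rfl)
      cases hc : pvFindClose l (l.length - 1) with
      | none => rfl
      | some j =>
        have hlne : l ≠ [] := by
          intro h; subst h; simp [pvFindClose_empty] at hc
        have hj : j < l.length := by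
          have h1 := pvFindClose_le l _ _ hc
          have h2 : 0 < l.length := List.length_pos_iff.mpr hlne
          omega
        exact (pvFindOpen_append l x j hj).symm

theorem pvBody_eq (lines : List String) :
    (match pvFindClose lines (lines.length - 1) with
     | none => none
     | some endIdx =>
       match pvFindOpen lines endIdx with
       | none => none
       | some startIdx =>
         some (PySem.Str.join "\n"
           (PySem.List.slice lines (some (startIdx : Int)) (some ((endIdx : Int) + 1))))) =
    (match pvScan lines 0 (none, none, none) with
     | (_, some startIdx, some endIdx) =>
       some (PySem.Str.join "\n"
         (PySem.List.slice lines (some (startIdx : Int)) (some ((endIdx : Int) + 1))))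
     | _ => none) := by
  rw [pvScan_spec]
  cases hc : pvFindClose lines (lines.length - 1) with
  | none => rfl
  | some e =>
    cases ho : pvFindOpen lines e with
    | none => simp [ho]
    | some s => simp [ho]

-- ===== VERDICT (by name: the statement is the Claim_ definition above) =====
theorem extract_json_from_stderr_py_spec : Claim_equal_extract_json_from_stderr_py := by
  intro stderr _
  show extract_json_from_stderr_py stderr = extract_json_from_stderr_py_alt stderr
  simp only [extract_json_from_stderr_py, extract_json_from_stderr_py_alt]
  generalize (PySem.Str.split? (PySem.Str.strip stderr) "\n").getD ([] : List String) = L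
  exact pvBody_eq L
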